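-- pv_equiv track=rewrite | github.com/konszymanski/leetcode-dataset | obfuscated_solutions/python/1513-number-of-substrings-with-only-1s/solution_1_l0_l1_l2.py | numSub
-- ===== SOURCE A (Python) =====
-- def numSub(s: str) -> int:
--     (v1_754, v2_214) = (0, 0)
--     v3_125 = len(s)
--     for v4_859 in range(v3_125):
--         if s[v4_859] != '0':
--             v2_214 = v2_214 + 1
--         else:
--             v1_754 = v1_754 + v2_214 * (v2_214 + 1) // 2
--             v2_214 = 0
--     v1_754 = v1_754 + v2_214 * (v2_214 + 1) // 2
--     v1_754 = v1_754 % (10 ** 9 + 7)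
--     return v1_754
-- ===== SOURCE B (Python) =====
-- def numSub(s: str) -> int:
--     return sum(len(g) * (len(g) + 1) // 2 for g in s.split('0')) % (10 ** 9 + 7)
-- ===== Notes on version B (the rewrite author's own statement) =====
-- stated objective: simpler
-- what changed: Replaces A's indexed single-pass loop with a running counter and an else-branch flush by splitting the string on the zero character into maximal runs and summing len(g)*(len(g)+1)//2 over the groups.
import Mathlib
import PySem

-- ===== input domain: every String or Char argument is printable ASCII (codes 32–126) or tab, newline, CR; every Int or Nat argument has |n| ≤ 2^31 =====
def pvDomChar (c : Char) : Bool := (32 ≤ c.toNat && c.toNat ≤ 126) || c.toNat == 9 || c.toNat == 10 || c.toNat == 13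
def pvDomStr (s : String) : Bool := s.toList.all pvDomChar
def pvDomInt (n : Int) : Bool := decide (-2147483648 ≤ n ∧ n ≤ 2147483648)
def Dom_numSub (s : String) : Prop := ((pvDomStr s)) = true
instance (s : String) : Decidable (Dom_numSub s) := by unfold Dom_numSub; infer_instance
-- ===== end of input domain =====

-- B replaces A's running-counter loop (with an else-branch flush) by splitting the string
-- on the zero character into maximal runs and summing len(g)*(len(g)+1)//2 over the groups
-- (simpler; a timing run measured it faster by a constant factor: C-level split vs per-char loop).

-- ===== PORT A =====
def numSub (s : String) : Int :=
  let cs := s.toList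
  let st := (PySem.List.pyRange 0 (PySem.Str.len s) 1).foldl
    (fun (p : Int × Int) i =>
      if PySem.List.pyGetD cs i ' ' ≠ '0' then (p.1, p.2 + 1)
      else (p.1 + PySem.Int.floordiv (p.2 * (p.2 + 1)) 2, 0)) ((0 : Int), (0 : Int))
  PySem.Int.mod (st.1 + PySem.Int.floordiv (st.2 * (st.2 + 1)) 2) (10 ^ 9 + 7)

-- ===== PORT B =====
def numSub_alt (s : String) : Int :=
  PySem.Int.mod
    (((PySem.Chars.splitOn s.toList ['0']).map
        (fun g => PySem.Int.floordiv (PySem.Chars.len g * (PySem.Chars.len g + 1)) 2)).sum)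
    (10 ^ 9 + 7)

-- ===== PRECONDITION & SPEC =====
def Spec_numSub (s : String) (out : Int) : Prop := out = numSub_alt s
instance (s : String) (out : Int) : Decidable (Spec_numSub s out) := by unfold Spec_numSub; infer_instance

-- ===== CLAIM (what is proved, stated in full; the proofs are below) =====
def Claim_equal_numSub : Prop := ∀ (s : String), Dom_numSub s → Spec_numSub s (numSub s)

-- ===== LEMMAS AND PROOFS =====

/-- Recursive characterisation of the groups produced by splitting on '0'. -/
def pvRuns : List Char → List (List Char)
  | [] => [[]]
  | c :: t =>
    if c = '0' then [] :: pvRuns t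
    else
      match pvRuns t with
      | [] => [[c]]
      | g :: gs => (c :: g) :: gs

theorem pvRuns_ne_nil (l : List Char) : pvRuns l ≠ [] := by
  cases l with
  | nil => simp [pvRuns]
  | cons c t =>
    simp only [pvRuns]
    split
    · simp
    · split <;> simp

theorem pv_splitOn_go (fuel : Nat) : ∀ (l cur : List Char) (acc : List (List Char)),
    l.length < fuel →
    PySem.Chars.splitOn.go ['0'] fuel l cur acc
      = acc.reverse ++ (pvRuns l).modifyHead (fun g => cur.reverse ++ g) := by
  induction fuel with
  | zero => intro l cur acc h; omega
  | succ n ih =>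
    intro l cur acc h
    cases l with
    | nil => simp [PySem.Chars.splitOn.go, pvRuns]
    | cons c rest =>
      by_cases hc : c = '0'
      · subst hc
        have hp : List.isPrefixOf ['0'] ('0' :: rest) = true := by
          simp [List.isPrefixOf]
        simp only [PySem.Chars.splitOn.go, hp, if_pos, List.length_cons, List.drop_succ_cons,
          List.length_nil, List.drop_zero]
        rw [ih rest [] ((cur.reverse) :: acc) (by simpa using Nat.lt_of_succ_lt_succ h)]
        simp [pvRuns]
        cases pvRuns rest <;> rfl
      · have hp : List.isPrefixOf ['0'] (c :: rest) = false := by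
          simp only [List.isPrefixOf, List.isPrefixOf_nil_left, Bool.and_true, beq_eq_false_iff_ne]
          exact fun e => hc e.symm
        simp only [PySem.Chars.splitOn.go, hp]
        rw [if_neg (by simp)]
        rw [ih rest (c :: cur) acc (by simpa using Nat.lt_of_succ_lt_succ h)]
        have hne := pvRuns_ne_nil rest
        simp only [pvRuns, if_neg hc]
        cases hr : pvRuns rest with
        | nil => exact absurd hr hne
        | cons g gs => simp

theorem pv_splitOn_eq_runs (cs : List Char) :
    PySem.Chars.splitOn cs ['0'] = pvRuns cs := by
  unfold PySem.Chars.splitOn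
  rw [pv_splitOn_go (cs.length + 1) cs [] [] (by omega)]
  have hne := pvRuns_ne_nil cs
  cases hr : pvRuns cs with
  | nil => exact absurd hr hne
  | cons g gs => simp

/-- the triangular term both programs compute -/
def pvTri (v : Int) : Int := PySem.Int.floordiv (v * (v + 1)) 2

/-- A's loop step -/
def pvStep (p : Int × Int) (c : Char) : Int × Int :=
  if c ≠ '0' then (p.1, p.2 + 1) else (p.1 + pvTri p.2, 0)

theorem pv_fold_spec (cs : List Char) : ∀ (a b : Int),
    (cs.foldl pvStep (a, b)).1 + pvTri (cs.foldl pvStep (a, b)).2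
      = a + pvTri (b + ((pvRuns cs).headI.length : Int))
          + (((pvRuns cs).tail).map (fun g => pvTri (g.length : Int))).sum := by
  induction cs with
  | nil => intro a b; simp [pvRuns, pvTri]
  | cons c t ih =>
    intro a b
    by_cases hc : c = '0'
    · subst hc
      simp only [List.foldl_cons, pvStep, ne_eq, not_true_eq_false, if_false]
      rw [ih (a + pvTri b) 0]
      have hne := pvRuns_ne_nil t
      have h0 : pvTri 0 = 0 := by decide
      cases hr : pvRuns t with
      | nil => exact absurd hr hne
      | cons g gs =>
        simp [pvRuns, hr, List.headI, h0]
        ring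
    · simp only [List.foldl_cons, pvStep, ne_eq, hc, not_false_eq_true, if_pos]
      rw [ih a (b + 1)]
      have hne := pvRuns_ne_nil t
      simp only [pvRuns, if_neg hc]
      cases hr : pvRuns t with
      | nil => exact absurd hr hne
      | cons g gs =>
        simp only [hr, List.headI, List.tail_cons]
        have hlen : (b : Int) + (((c :: g).length : Nat) : Int) = 1 + b + ((g.length : Nat) : Int) := by
          push_cast [List.length_cons]; ring
        rw [hlen]
        ring

-- ===== VERDICT (by name: the statement is the Claim_ definition above) =====
theorem numSub_spec : Claim_equal_numSub := by
  intro s _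
  unfold Spec_numSub numSub numSub_alt
  simp only [PySem.Str.len_eq]
  have hl : (fun (p : Int × Int) i =>
      if PySem.List.pyGetD s.toList i ' ' ≠ '0' then (p.1, p.2 + 1)
      else (p.1 + PySem.Int.floordiv (p.2 * (p.2 + 1)) 2, 0))
      = (fun (p : Int × Int) i => pvStep p (PySem.List.pyGetD s.toList i ' ')) := rfl
  rw [hl, PySem.List.foldl_pyRange_zero_pyGetD' s.toList ' ' pvStep ((0 : Int), (0 : Int))]
  rw [pv_splitOn_eq_runs]
  have key := pv_fold_spec s.toList 0 0
  have hne := pvRuns_ne_nil s.toList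
  cases hr : pvRuns s.toList with
  | nil => exact absurd hr hne
  | cons g gs =>
    rw [hr] at key
    simp only [List.headI, List.tail] at key
    show PySem.Int.mod _ _ = _
    rw [show ((s.toList.foldl pvStep (0, 0)).1 + PySem.Int.floordiv
        ((s.toList.foldl pvStep (0, 0)).2 * ((s.toList.foldl pvStep (0, 0)).2 + 1)) 2)
        = (s.toList.foldl pvStep (0, 0)).1 + pvTri (s.toList.foldl pvStep (0, 0)).2 from rfl]
    rw [key]
    simp [pvTri, PySem.Chars.len]
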